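-- pv_equiv track=rewrite | github.com/AK16092003/aiml_practice | dpll_algo.py | find_pure_symbols
-- ===== SOURCE A (Python) =====
-- def find_pure_symbols(clause , symbol , model):
--
--
--     symb = []
--     vals = []
--
--     for x in symbol:
--
--         pos = 0
--         neg = 0
--
--         for cl in clause:
--             if x in cl:
--                 pos += 1
--             if -x in cl:
--                 neg += 1
--         if pos == 0 and neg > 0:
--             symb.append(x)
--             vals.append(False)
--         if neg == 0 and pos > 0:
--             symb.append(x)
--             vals.append(True)
--
--     return (symb , vals)
-- ===== SOURCE B (Python) =====
-- def find_pure_symbols(clause, symbol, model):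
--     # One pass over all clause literals into a presence set, then check each symbol.
--     seen = set()
--     for cl in clause:
--         seen.update(cl)
--     symb = []
--     vals = []
--     for x in symbol:
--         p = x in seen
--         n = -x in seen
--         if n and not p:
--             symb.append(x)
--             vals.append(False)
--         elif p and not n:
--             symb.append(x)
--             vals.append(True)
--     return (symb, vals)
-- ===== Notes on version B (the rewrite author's own statement) =====
-- stated objective: faster
-- what changed: Instead of scanning every clause for each symbol (counting occurrences of x and -x), B builds one literal-presence set in a single pass over all clause literals and then answers each symbol by two O(1) membership tests.
import Mathlib
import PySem

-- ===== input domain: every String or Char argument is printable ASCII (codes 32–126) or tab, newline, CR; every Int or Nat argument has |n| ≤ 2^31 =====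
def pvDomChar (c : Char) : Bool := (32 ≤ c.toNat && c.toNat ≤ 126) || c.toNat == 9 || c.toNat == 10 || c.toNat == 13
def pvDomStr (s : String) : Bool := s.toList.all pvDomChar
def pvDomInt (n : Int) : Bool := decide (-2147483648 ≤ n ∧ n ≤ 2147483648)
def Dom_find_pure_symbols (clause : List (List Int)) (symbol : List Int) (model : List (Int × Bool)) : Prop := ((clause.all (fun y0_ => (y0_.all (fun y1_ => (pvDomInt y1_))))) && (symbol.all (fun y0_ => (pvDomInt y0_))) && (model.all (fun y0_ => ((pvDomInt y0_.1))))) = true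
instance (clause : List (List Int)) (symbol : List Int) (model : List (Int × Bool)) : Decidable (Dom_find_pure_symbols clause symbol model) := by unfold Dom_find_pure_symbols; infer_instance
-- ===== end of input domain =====

-- B builds one literal-presence set in a single pass, then answers each symbol by two membership tests (A rescans every clause per symbol).

-- ===== PORT A =====
-- inner loop of A: count clauses containing x (pos) and clauses containing -x (neg)
def fpsInner (x : Int) (pn : Int × Int) (cl : List Int) : Int × Int :=
  let pn1 := if cl.contains x then (pn.1 + 1, pn.2) else pn
  if cl.contains (-x) then (pn1.1, pn1.2 + 1) else pn1

-- outer loop body of A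
def fpsOuterA (clause : List (List Int)) (acc : List Int × List Bool) (x : Int) : List Int × List Bool :=
  let pn := clause.foldl (fpsInner x) (0, 0)
  let acc1 := if pn.1 = 0 ∧ pn.2 > 0 then (acc.1 ++ [x], acc.2 ++ [false]) else acc
  if pn.2 = 0 ∧ pn.1 > 0 then (acc1.1 ++ [x], acc1.2 ++ [true]) else acc1

def find_pure_symbols (clause : List (List Int)) (symbol : List Int) (model : List (Int × Bool)) : List Int × List Bool :=
  symbol.foldl (fpsOuterA clause) ([], [])

-- ===== PORT B =====
-- loop body of B: two membership tests in the presence set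
def fpsOuterB (seen : PySem.Set Int) (acc : List Int × List Bool) (x : Int) : List Int × List Bool :=
  let p := PySem.Set.contains seen x
  let n := PySem.Set.contains seen (-x)
  if n && !p then (acc.1 ++ [x], acc.2 ++ [false])
  else if p && !n then (acc.1 ++ [x], acc.2 ++ [true])
  else acc

def find_pure_symbols_alt (clause : List (List Int)) (symbol : List Int) (model : List (Int × Bool)) : List Int × List Bool :=
  let seen := clause.foldl (fun s cl => PySem.Set.update s cl) PySem.Set.empty
  symbol.foldl (fpsOuterB seen) ([], [])

-- ===== PRECONDITION & SPEC =====
def Spec_find_pure_symbols (clause : List (List Int)) (symbol : List Int) (model : List (Int × Bool)) (out : List Int × List Bool) : Prop := out = find_pure_symbols_alt clause symbol model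
instance (clause : List (List Int)) (symbol : List Int) (model : List (Int × Bool)) (out : List Int × List Bool) : Decidable (Spec_find_pure_symbols clause symbol model out) := by unfold Spec_find_pure_symbols; infer_instance

-- ===== CLAIM (what is proved, stated in full; the proofs are below) =====
def Claim_equal_find_pure_symbols : Prop := ∀ (clause : List (List Int)) (symbol : List Int) (model : List (Int × Bool)), Dom_find_pure_symbols clause symbol model → Spec_find_pure_symbols clause symbol model (find_pure_symbols clause symbol model)

-- ===== LEMMAS AND PROOFS =====

-- A's inner fold counts, starting from an arbitrary accumulator
theorem fpsInner_fold (x : Int) (clause : List (List Int)) (pn : Int × Int) :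
    clause.foldl (fpsInner x) pn =
      (pn.1 + (clause.countP (fun cl => cl.contains x) : Int),
       pn.2 + (clause.countP (fun cl => cl.contains (-x)) : Int)) := by
  induction clause generalizing pn with
  | nil => simp
  | cons cl tl ih =>
    simp only [List.foldl_cons, ih, List.countP_cons, fpsInner]
    split_ifs <;> simp_all <;> omega

theorem mem_seen (clause : List (List Int)) (y : Int) :
    (y ∈ clause.foldl (fun s cl => PySem.Set.update s cl) PySem.Set.empty) ↔
      ∃ cl ∈ clause, y ∈ cl := by
  have h : ∀ (s : PySem.Set Int),
      (y ∈ clause.foldl (fun s cl => PySem.Set.update s cl) s) ↔ y ∈ s ∨ ∃ cl ∈ clause, y ∈ cl := by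
    induction clause with
    | nil => simp
    | cons cl tl ih => intro s; simp [ih, PySem.Set.mem_update]; tauto
  simpa [PySem.Set.empty] using h PySem.Set.empty

theorem countP_pos_iff (clause : List (List Int)) (y : Int) :
    (0 < (clause.countP (fun cl => cl.contains y) : Int)) ↔ ∃ cl ∈ clause, y ∈ cl := by
  rw [show (0 : Int) < (clause.countP (fun cl => cl.contains y) : Int)
        ↔ 0 < clause.countP (fun cl => cl.contains y) by exact_mod_cast Iff.rfl]
  simp [List.countP_pos_iff]

theorem countP_zero_iff (clause : List (List Int)) (y : Int) :
    ((clause.countP (fun cl => cl.contains y) : Int) = 0) ↔ ¬ ∃ cl ∈ clause, y ∈ cl := by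
  rw [show ((clause.countP (fun cl => cl.contains y) : Int) = 0)
        ↔ clause.countP (fun cl => cl.contains y) = 0 by exact_mod_cast Iff.rfl]
  simp [List.countP_eq_zero]

theorem step_eq (clause : List (List Int)) (acc : List Int × List Bool) (x : Int) :
    fpsOuterA clause acc x =
      fpsOuterB (clause.foldl (fun s cl => PySem.Set.update s cl) PySem.Set.empty) acc x := by
  unfold fpsOuterA fpsOuterB
  have hp : PySem.Set.contains (clause.foldl (fun s cl => PySem.Set.update s cl) PySem.Set.empty) x
      = decide (∃ cl ∈ clause, x ∈ cl) := by
    simp [PySem.Set.contains, ← mem_seen clause x]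
  have hn : PySem.Set.contains (clause.foldl (fun s cl => PySem.Set.update s cl) PySem.Set.empty) (-x)
      = decide (∃ cl ∈ clause, -x ∈ cl) := by
    simp [PySem.Set.contains, ← mem_seen clause (-x)]
  rw [fpsInner_fold, hp, hn]
  simp only [Int.zero_add]
  simp only [countP_zero_iff clause x, countP_pos_iff clause x,
    countP_zero_iff clause (-x), countP_pos_iff clause (-x)]
  by_cases hP : ∃ cl ∈ clause, x ∈ cl <;> by_cases hN : ∃ cl ∈ clause, -x ∈ cl <;>
    simp [hP, hN]

-- ===== VERDICT (by name: the statement is the Claim_ definition above) =====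
theorem find_pure_symbols_spec : Claim_equal_find_pure_symbols := by
  intro clause symbol model _
  unfold Spec_find_pure_symbols find_pure_symbols find_pure_symbols_alt
  have hf : fpsOuterA clause =
      fpsOuterB (clause.foldl (fun s cl => PySem.Set.update s cl) PySem.Set.empty) :=
    funext fun acc => funext fun x => step_eq clause acc x
  rw [hf]
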